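-- pv_equiv track=rewrite | github.com/mrjoe99/advent2023 | advent_3b.py | check_below_left
-- ===== SOURCE A (Python) =====
-- def check_below_left(number, symbols):
--     for position in number[1]:
--         y = position[0] + 1
--         x = position[1] - 1
--
--         for symbol in symbols:
--             if [y, x] == symbol[1]:
--                 return True
--
--     return False
-- ===== SOURCE B (Python) =====
-- def check_below_left(number, symbols):
--     targets = {(p[0] + 1, p[1] - 1) for p in number[1]}
--     syms = {tuple(s[1]) for s in symbols}
--     return bool(targets & syms)
-- ===== Notes on version B (the rewrite author's own statement) =====
-- stated objective: simpler
-- what changed: Replaces the nested scan with early return by building the set of below-left target coordinates and the set of symbol coordinates once and testing their intersection for non-emptiness.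
-- outside the precondition, e.g. on check_below_left([[], []], [[]]): A returns False, B raises IndexError; on check_below_left([[], [[0, 0]]], [[[], [1, -1]], [[]]]): A returns True, B raises IndexError
import Mathlib
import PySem

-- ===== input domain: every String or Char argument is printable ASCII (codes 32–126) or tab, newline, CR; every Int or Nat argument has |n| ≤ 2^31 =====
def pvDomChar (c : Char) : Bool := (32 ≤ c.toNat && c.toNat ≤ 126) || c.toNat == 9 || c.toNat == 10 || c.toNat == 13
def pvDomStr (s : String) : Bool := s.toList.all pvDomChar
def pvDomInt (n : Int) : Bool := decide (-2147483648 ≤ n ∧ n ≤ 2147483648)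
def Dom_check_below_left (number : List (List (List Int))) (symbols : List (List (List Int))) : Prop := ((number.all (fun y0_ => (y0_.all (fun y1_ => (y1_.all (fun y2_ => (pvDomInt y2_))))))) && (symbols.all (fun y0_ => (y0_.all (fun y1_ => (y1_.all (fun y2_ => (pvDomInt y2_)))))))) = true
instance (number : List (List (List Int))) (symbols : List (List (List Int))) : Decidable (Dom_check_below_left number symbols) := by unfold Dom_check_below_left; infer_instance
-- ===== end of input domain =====

-- B replaces A's nested scan with early return by two coordinate sets and a set-intersection test (objective: simpler).

-- ===== PORT A =====
-- inner 'for symbol in symbols: if [y, x] == symbol[1]: return True'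
def pvFindSym (y x : Int) (symbols : List (List (List Int))) : Bool :=
  match symbols with
  | [] => false
  | s :: rest =>
    if [y, x] = (PySem.List.pyGet? s 1).getD [] then true else pvFindSym y x rest

-- outer 'for position in number[1]: …'
def pvOuter (positions : List (List Int)) (symbols : List (List (List Int))) : Bool :=
  match positions with
  | [] => false
  | p :: rest =>
    let y := (PySem.List.pyGet? p 0).getD 0 + 1
    let x := (PySem.List.pyGet? p 1).getD 0 - 1
    if pvFindSym y x symbols then true else pvOuter rest symbols

def check_below_left (number : List (List (List Int))) (symbols : List (List (List Int))) : Bool :=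
  pvOuter ((PySem.List.pyGet? number 1).getD []) symbols

-- ===== PORT B =====
def check_below_left_alt (number : List (List (List Int))) (symbols : List (List (List Int))) : Bool :=
  let targets : PySem.Set (List Int) :=
    PySem.Set.ofList (((PySem.List.pyGet? number 1).getD []).map
      (fun p => [(PySem.List.pyGet? p 0).getD 0 + 1, (PySem.List.pyGet? p 1).getD 0 - 1]))
  let syms : PySem.Set (List Int) :=
    PySem.Set.ofList (symbols.map (fun s => (PySem.List.pyGet? s 1).getD []))
  !(PySem.Set.inter targets syms).isEmpty

-- ===== PRECONDITION & SPEC =====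
-- Pre_ excludes inputs where number[1], position[0/1] or symbol[1] would raise IndexError in
-- Python; because A stops early, it also excludes a few inputs where A returns before touching a
-- too-short position/symbol that B's eager set construction does touch (B raises there) — see cites.
def Pre_check_below_left (number : List (List (List Int))) (symbols : List (List (List Int))) : Prop :=
  2 ≤ number.length ∧ (∀ p ∈ (number.drop 1).headD [], 2 ≤ p.length) ∧ (∀ s ∈ symbols, 2 ≤ s.length)
instance (number : List (List (List Int))) (symbols : List (List (List Int))) : Decidable (Pre_check_below_left number symbols) := by unfold Pre_check_below_left; infer_instance

def pvWitness_check_below_left : List (List (List Int)) × List (List (List Int)) :=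
  ([[], [[0, 1]]], [[[5, 5], [1, 0]]])

def Spec_check_below_left (number : List (List (List Int))) (symbols : List (List (List Int))) (out : Bool) : Prop := out = check_below_left_alt number symbols
instance (number : List (List (List Int))) (symbols : List (List (List Int))) (out : Bool) : Decidable (Spec_check_below_left number symbols out) := by unfold Spec_check_below_left; infer_instance

-- ===== CLAIM (what is proved, stated in full; the proofs are below) =====
def Claim_equal_check_below_left : Prop := ∀ (number : List (List (List Int))) (symbols : List (List (List Int))), Dom_check_below_left number symbols → Pre_check_below_left number symbols → Spec_check_below_left number symbols (check_below_left number symbols)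

-- ===== LEMMAS AND PROOFS =====
theorem pvFindSym_eq_any (y x : Int) (symbols : List (List (List Int))) :
    pvFindSym y x symbols = symbols.any (fun s => [y, x] = (PySem.List.pyGet? s 1).getD []) := by
  induction symbols with
  | nil => rfl
  | cons s rest ih =>
    simp only [pvFindSym, ih, List.any_cons]
    split_ifs with h <;> simp [h]

theorem pvOuter_eq_any (positions : List (List Int)) (symbols : List (List (List Int))) :
    pvOuter positions symbols = positions.any (fun p =>
      symbols.any (fun s =>
        [(PySem.List.pyGet? p 0).getD 0 + 1, (PySem.List.pyGet? p 1).getD 0 - 1]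
          = (PySem.List.pyGet? s 1).getD [])) := by
  induction positions with
  | nil => rfl
  | cons p rest ih =>
    simp only [pvOuter, pvFindSym_eq_any, List.any_cons, ih]
    split_ifs with h <;> simp [h]

theorem check_below_left_spec : Claim_equal_check_below_left := by
  intro number symbols _ _
  unfold Spec_check_below_left check_below_left check_below_left_alt
  rw [pvOuter_eq_any]
  rw [Bool.eq_iff_iff]
  simp only [List.any_eq_true, Bool.not_eq_true', List.isEmpty_eq_false_iff_exists_mem,
    decide_eq_true_eq]
  constructor
  · rintro ⟨p, hp, s, hs, heq⟩
    refine ⟨[(PySem.List.pyGet? p 0).getD 0 + 1, (PySem.List.pyGet? p 1).getD 0 - 1], ?_⟩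
    rw [PySem.Set.mem_inter]
    constructor
    · rw [PySem.Set.mem_ofList]
      exact List.mem_map.mpr ⟨p, hp, rfl⟩
    · rw [PySem.Set.mem_ofList]
      exact List.mem_map.mpr ⟨s, hs, heq.symm⟩
  · rintro ⟨t, ht⟩
    rw [PySem.Set.mem_inter, PySem.Set.mem_ofList, PySem.Set.mem_ofList] at ht
    obtain ⟨h1, h2⟩ := ht
    obtain ⟨p, hp, hpe⟩ := List.mem_map.mp h1
    obtain ⟨s, hs, hse⟩ := List.mem_map.mp h2
    exact ⟨p, hp, s, hs, by rw [hpe, hse]⟩
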